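-- pv_equiv track=rewrite | github.com/NataliaResh/programmingAlgorithms | mintask09/mintask09.py | culculate_size
-- ===== SOURCE A (Python) =====
-- MIN_SIZE = 64
--
-- def culculate_size(n):
--     i = 1
--     pivot = n
--     while pivot % 2 == 0 and pivot > MIN_SIZE:
--         i *= 2
--         pivot //= 2
--     if pivot <= MIN_SIZE:
--         return n
--     while pivot > MIN_SIZE:
--         i *= 2
--         pivot = (pivot + 1) // 2
--     size = n + i - (n % i)
--     return size
-- ===== SOURCE B (Python) =====
-- MIN_SIZE = 64
--
-- def culculate_size(n):
--     if n <= MIN_SIZE: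
--         return n
--     m = n
--     while m % 2 == 0:
--         m //= 2
--     if m <= MIN_SIZE:
--         return n
--     i = (n // m) << (m.bit_length() - 6)
--     return (n // i + 1) * i
-- ===== Notes on version B (the rewrite author's own statement) =====
-- stated objective: alternative
-- what changed: A's second loop (repeated ceiling-halving of the odd pivot, doubling i each step) is replaced by a closed form: i = (n // m) << (m.bit_length() - 6) for the odd part m, followed by a direct rounding-up formula (n // i + 1) * i instead of n + i - n % i.
import Mathlib
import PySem

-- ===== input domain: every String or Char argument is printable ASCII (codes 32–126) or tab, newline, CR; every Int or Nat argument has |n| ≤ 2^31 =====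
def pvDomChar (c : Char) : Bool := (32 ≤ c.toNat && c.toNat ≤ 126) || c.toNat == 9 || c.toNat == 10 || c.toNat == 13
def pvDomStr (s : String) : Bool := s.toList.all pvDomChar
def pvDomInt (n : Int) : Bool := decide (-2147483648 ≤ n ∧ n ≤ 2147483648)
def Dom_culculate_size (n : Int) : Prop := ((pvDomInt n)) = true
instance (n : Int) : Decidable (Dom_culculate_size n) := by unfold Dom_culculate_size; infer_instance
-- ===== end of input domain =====

-- B replaces A's second halving loop by a bit_length closed form and the final
-- mod-adjustment by a direct round-up formula (objective: alternative, same cost class).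

-- ===== PORT A =====
-- first while loop: strip factors of 2 while pivot is even and > 64
def pvLoopA1 (i pivot : Int) : Int × Int :=
  if h : PySem.Int.mod pivot 2 = 0 ∧ 64 < pivot then
    pvLoopA1 (i * 2) (PySem.Int.floordiv pivot 2)
  else (i, pivot)
termination_by pivot.toNat
decreasing_by
  simp only [PySem.Int.floordiv_eq_ediv_of_pos (by omega : (0:Int) < 2)]
  omega

-- second while loop: ceiling-halve pivot until ≤ 64, doubling i
def pvLoopA2 (i pivot : Int) : Int × Int :=
  if h : 64 < pivot then
    pvLoopA2 (i * 2) (PySem.Int.floordiv (pivot + 1) 2)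
  else (i, pivot)
termination_by pivot.toNat
decreasing_by
  simp only [PySem.Int.floordiv_eq_ediv_of_pos (by omega : (0:Int) < 2)]
  omega

def culculate_size (n : Int) : Int :=
  let r := pvLoopA1 1 n
  if r.2 ≤ 64 then n
  else
    let r2 := pvLoopA2 r.1 r.2
    n + r2.1 - PySem.Int.mod n r2.1

-- ===== PORT B =====
-- odd-part loop: `while m % 2 == 0: m //= 2`; the `0 < m` conjunct is a totality
-- guard only (B only calls it with m > 64; Python would not terminate on m = 0)
def pvOddPart (m : Int) : Int :=
  if h : PySem.Int.mod m 2 = 0 ∧ 0 < m then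
    pvOddPart (PySem.Int.floordiv m 2)
  else m
termination_by m.toNat
decreasing_by
  simp only [PySem.Int.floordiv_eq_ediv_of_pos (by omega : (0:Int) < 2)]
  omega

def culculate_size_alt (n : Int) : Int :=
  if n ≤ 64 then n
  else
    let m := pvOddPart n
    if m ≤ 64 then n
    else
      let i := PySem.Int.floordiv n m * 2 ^ (PySem.Int.bitLength m - 6)
      (PySem.Int.floordiv n i + 1) * i

-- ===== PRECONDITION & SPEC =====
def Spec_culculate_size (n : Int) (out : Int) : Prop := out = culculate_size_alt n
instance (n : Int) (out : Int) : Decidable (Spec_culculate_size n out) := by unfold Spec_culculate_size; infer_instance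

-- ===== CLAIM (what is proved, stated in full; the proofs are below) =====
def Claim_equal_culculate_size : Prop := ∀ (n : Int), Dom_culculate_size n → Spec_culculate_size n (culculate_size n)

-- ===== LEMMAS AND PROOFS =====

theorem pv_fd2 (a : Int) : PySem.Int.floordiv a 2 = a / 2 :=
  PySem.Int.floordiv_eq_ediv_of_pos (by omega)

theorem pv_md2 (a : Int) : PySem.Int.mod a 2 = a % 2 :=
  PySem.Int.mod_eq_emod_of_pos (by omega)

theorem oddPart_odd (m : Int) (hm : 0 < m) : 0 < pvOddPart m ∧ pvOddPart m % 2 = 1 := by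
  induction m using pvOddPart.induct with
  | case1 m h ih =>
    rw [pvOddPart, dif_pos h]
    rw [pv_md2] at h
    exact ih (by rw [pv_fd2]; omega)
  | case2 m h =>
    rw [pvOddPart, dif_neg h]
    rw [pv_md2] at h
    constructor
    · exact hm
    · omega

theorem oddPart_le (m : Int) (hm : 0 < m) : pvOddPart m ≤ m := by
  induction m using pvOddPart.induct with
  | case1 m h ih =>
    rw [pvOddPart, dif_pos h]
    rw [pv_md2] at h
    rw [pv_fd2] at *
    have := ih (by omega)
    omega
  | case2 m h => rw [pvOddPart, dif_neg h]

theorem oddPart_of_odd (m : Int) (hm : m % 2 = 1) : pvOddPart m = m := by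
  rw [pvOddPart, dif_neg]
  rw [pv_md2]
  omega

-- loop-1 invariant: product preserved, positivity, and the odd part tracked
theorem loopA1_inv (i p : Int) (hp : 0 < p) (hi : 0 < i) :
    0 < (pvLoopA1 i p).2 ∧ 0 < (pvLoopA1 i p).1 ∧
    (pvLoopA1 i p).1 * (pvLoopA1 i p).2 = i * p ∧
    (64 < (pvLoopA1 i p).2 → (pvLoopA1 i p).2 % 2 = 1) ∧
    pvOddPart (pvLoopA1 i p).2 = pvOddPart p := by
  induction i, p using pvLoopA1.induct with
  | case1 i p h ih =>
    rw [pvLoopA1, dif_pos h]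
    rw [pv_md2, ] at h
    rw [pv_fd2] at *
    obtain ⟨h1, h2, h3, h5, h4⟩ := ih (by omega) (by omega)
    refine ⟨h1, h2, ?_, h5, ?_⟩
    · rw [h3]; have : p / 2 * 2 = p := by omega
      ring_nf; ring_nf at this ⊢; nlinarith [this]
    · rw [h4]; conv_rhs => rw [pvOddPart, dif_pos (⟨by rw [pv_md2]; omega, by omega⟩ : PySem.Int.mod p 2 = 0 ∧ 0 < p), pv_fd2]
  | case2 i p h =>
    rw [pvLoopA1, dif_neg h]
    rw [pv_md2] at h
    refine ⟨hp, hi, rfl, ?_, rfl⟩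
    intro h64
    rcases Int.emod_two_eq p with h2 | h2
    · exact absurd ⟨h2, h64⟩ h
    · exact h2

-- loop-2 closed form: the final i is the initial i times 2 ^ (clog₂ pivot − 6)
theorem loopA2_fst (i p : Int) (hp : 64 < p) :
    (pvLoopA2 i p).1 = i * 2 ^ (Nat.clog 2 p.toNat - 6) := by
  induction i, p using pvLoopA2.induct with
  | case1 i p h ih =>
    rw [pvLoopA2, dif_pos h]
    rw [pv_fd2] at *
    have hq : ((p + 1) / 2).toNat = (p.toNat + 1) / 2 := by omega
    have hrec : Nat.clog 2 p.toNat = Nat.clog 2 ((p.toNat + 1) / 2) + 1 := by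
      have := Nat.clog_of_two_le (b := 2) (by omega) (n := p.toNat) (by omega)
      simpa using this
    have hge7 : 7 ≤ Nat.clog 2 p.toNat := by
      by_contra hlt
      have : p.toNat ≤ 2 ^ 6 := (Nat.clog_le_iff_le_pow (by omega)).1 (by omega)
      omega
    by_cases h64 : 64 < (p + 1) / 2
    · have := ih h64
      rw [this, hq] at *
      have hq7 : 7 ≤ Nat.clog 2 ((p.toNat + 1) / 2) := by
        by_contra hlt
        have : (p.toNat + 1) / 2 ≤ 2 ^ 6 := (Nat.clog_le_iff_le_pow (by omega)).1 (by omega)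
        omega
      rw [hrec]
      have : Nat.clog 2 ((p.toNat + 1) / 2) + 1 - 6 = (Nat.clog 2 ((p.toNat + 1) / 2) - 6) + 1 := by omega
      rw [this, pow_succ]; ring
    · rw [pvLoopA2, dif_neg h64]
      have hle7 : Nat.clog 2 p.toNat ≤ 7 := by
        apply (Nat.clog_le_iff_le_pow (by omega)).2
        norm_num
        omega
      have : Nat.clog 2 p.toNat = 7 := by omega
      rw [this]; norm_num
  | case2 i p h => omega

-- for odd m > 64, bit_length m = clog₂ m
theorem bitLen_eq_clog (m : Int) (hodd : m % 2 = 1) (h64 : 64 < m) :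
    PySem.Int.bitLength m = Nat.clog 2 m.toNat := by
  set b := PySem.Int.bitLength m with hb
  have hub : m.natAbs < 2 ^ b := PySem.Int.lt_two_pow_bitLength m
  have hlb : 2 ^ (b - 1) ≤ m.natAbs := PySem.Int.two_pow_bitLength_le m (by omega)
  have hna : m.natAbs = m.toNat := by omega
  have hb7 : 7 ≤ b := by
    by_contra hlt
    have : 2 ^ b ≤ 2 ^ 6 := Nat.pow_le_pow_right (by omega) (by omega)
    omega
  have hodd' : m.natAbs % 2 = 1 := by omega
  have hstrict : 2 ^ (b - 1) < m.natAbs := by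
    rcases Nat.lt_or_ge (2 ^ (b - 1)) m.natAbs with h | h
    · exact h
    · exfalso
      have heq : m.natAbs = 2 ^ (b - 1) := by omega
      have : (2 : Nat) ^ (b - 1) % 2 = 0 := by
        have : b - 1 = (b - 2) + 1 := by omega
        rw [this, pow_succ]; omega
      omega
  apply le_antisymm
  · by_contra hlt
    have h1 : m.toNat ≤ 2 ^ (b - 1) := (Nat.clog_le_iff_le_pow (by omega)).1 (by omega)
    omega
  · apply (Nat.clog_le_iff_le_pow (by omega)).2
    omega

-- ===== VERDICT (by name: the statement is the Claim_ definition above) =====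
theorem culculate_size_spec : Claim_equal_culculate_size := by
  intro n _
  unfold Spec_culculate_size culculate_size culculate_size_alt
  by_cases hn : n ≤ 64
  · -- loop 1 exits immediately (pivot > 64 fails), both return n
    rw [pvLoopA1, dif_neg (by omega)]
    simp [hn]
  · push_neg at hn
    have hpos : (0:Int) < n := by omega
    obtain ⟨hp1, hi1, hprod, hpodd, hodd⟩ := loopA1_inv 1 n hpos (by omega)
    dsimp only
    rw [if_neg (show ¬ n ≤ 64 by omega)]
    set p1 := (pvLoopA1 1 n).2 with hp1d
    set i1 := (pvLoopA1 1 n).1 with hi1d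
    obtain ⟨hopos, hoodd⟩ := oddPart_odd n hpos
    by_cases hbig : p1 ≤ 64
    · -- A returns n; B's odd part ≤ 64, B returns n
      rw [if_pos hbig]
      have : pvOddPart n ≤ 64 := by
        rw [← hodd]
        calc pvOddPart p1 ≤ p1 := oddPart_le p1 hp1
          _ ≤ 64 := hbig
      rw [if_pos this]
    · push_neg at hbig
      rw [if_neg (show ¬ p1 ≤ 64 by omega)]
      -- p1 is the odd part of n
      have hmod : p1 % 2 = 1 := hpodd hbig
      have hm : pvOddPart n = p1 := by
        rw [← hodd]; exact oddPart_of_odd p1 hmod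
      rw [hm, if_neg (show ¬ p1 ≤ 64 by omega)]
      -- both sides' i coincide
      have hdiv : PySem.Int.floordiv n p1 = i1 := by
        rw [PySem.Int.floordiv_eq_ediv_of_pos hp1]
        have : n = i1 * p1 := by omega
        rw [this]
        exact Int.mul_ediv_cancel _ (by omega)
      rw [hdiv, bitLen_eq_clog p1 hmod hbig, loopA2_fst i1 p1 hbig]
      set k := Nat.clog 2 p1.toNat - 6
      set i := i1 * 2 ^ k with hid
      have hipos : 0 < i := by positivity
      rw [PySem.Int.mod_eq_emod_of_pos hipos, PySem.Int.floordiv_eq_ediv_of_pos hipos,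
        Int.emod_def]
      ring
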